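-- pv_equiv track=rewrite | github.com/KatoS1410/Lentochka | CheckupScript.py | _parse_scheduler_output
-- ===== SOURCE A (Python) =====
-- from typing import List, Optional, Tuple
--
-- def _parse_scheduler_output(output: str) -> List[dict]:
--     schedules: List[dict] = []
--     current: dict = {}
--     for raw_line in output.splitlines():
--         line = raw_line.strip()
--         if not line:
--             if current:
--                 schedules.append(current)
--                 current = {}
--             continue
--         if line.lower().startswith("schedule name"):
--             current["name"] = line.split(":", 1)[-1].strip()
--         elif line.lower().startswith("action"):
--             current["action"] = line.split(":", 1)[-1].strip()
--         elif line.lower().startswith("status"):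
--             current["status"] = line.split(":", 1)[-1].strip()
--     if current:
--         schedules.append(current)
--     return schedules
-- ===== SOURCE B (Python) =====
-- from typing import List
--
--
-- def _fields(block):
--     d = {}
--     for line in block:
--         low = line.lower()
--         if low.startswith("schedule name"):
--             d["name"] = line.split(":", 1)[-1].strip()
--         elif low.startswith("action"):
--             d["action"] = line.split(":", 1)[-1].strip()
--         elif low.startswith("status"):
--             d["status"] = line.split(":", 1)[-1].strip()
--     return d
--
--
-- def _parse_scheduler_output(output: str) -> List[dict]:
--     # Phase 1: group stripped lines into blocks separated by blank lines.
--     blocks = []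
--     block = []
--     for raw_line in output.splitlines():
--         line = raw_line.strip()
--         if line:
--             block.append(line)
--         else:
--             blocks.append(block)
--             block = []
--     blocks.append(block)
--     # Phase 2: turn each block into a schedule dict; drop empty ones.
--     schedules = []
--     for blk in blocks:
--         d = _fields(blk)
--         if d:
--             schedules.append(d)
--     return schedules
-- ===== Notes on version B (the rewrite author's own statement) =====
-- stated objective: alternative
-- what changed: B replaces A's single stateful loop (running dict flushed on blank lines) with a two-phase decomposition: group stripped lines into blank-separated blocks, then map each block to its field dict and keep the non-empty ones.
import Mathlib
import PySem

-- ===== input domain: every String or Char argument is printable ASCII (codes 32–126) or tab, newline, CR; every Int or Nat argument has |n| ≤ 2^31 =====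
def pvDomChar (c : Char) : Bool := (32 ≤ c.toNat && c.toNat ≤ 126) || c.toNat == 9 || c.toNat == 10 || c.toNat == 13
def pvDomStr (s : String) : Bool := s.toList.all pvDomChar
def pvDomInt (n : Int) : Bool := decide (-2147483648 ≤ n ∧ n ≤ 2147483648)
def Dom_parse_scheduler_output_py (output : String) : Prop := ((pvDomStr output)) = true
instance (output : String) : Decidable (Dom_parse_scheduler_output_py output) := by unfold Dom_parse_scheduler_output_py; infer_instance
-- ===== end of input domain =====

-- B re-implements A as group-lines-into-blocks, then map each block to its dict (same values; decomposition change, no speed claim).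

-- shared transliteration of the expression `line.split(":", 1)[-1].strip()` (identical in A and B)
def pvExtract (line : String) : String :=
  PySem.Str.strip (PySem.List.pyGetD ((PySem.Str.splitMax? line ":" 1).getD []) (-1) line)

-- ===== PORT A =====
-- one fold over the lines carrying (schedules, current), exactly A's loop
def pvStepA (st : List (PySem.Dict String String) × PySem.Dict String String)
    (raw_line : String) : List (PySem.Dict String String) × PySem.Dict String String :=
  let schedules := st.1
  let current := st.2
  let line := PySem.Str.strip raw_line
  if line = "" then
    if current.items ≠ [] then (schedules ++ [current], PySem.Dict.empty) else (schedules, current)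
  else if PySem.Str.startswith (PySem.Str.lower line) "schedule name" then
    (schedules, current.insert "name" (pvExtract line))
  else if PySem.Str.startswith (PySem.Str.lower line) "action" then
    (schedules, current.insert "action" (pvExtract line))
  else if PySem.Str.startswith (PySem.Str.lower line) "status" then
    (schedules, current.insert "status" (pvExtract line))
  else (schedules, current)

def parse_scheduler_output_py (output : String) : List (List (String × String)) :=
  let st := (PySem.Str.splitlines output).foldl pvStepA ([], PySem.Dict.empty)
  (st.1 ++ (if st.2.items ≠ [] then [st.2] else [])).map PySem.Dict.items

-- ===== PORT B =====
-- B's per-line assignment inside `_fields`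
def pvApplyB (d : PySem.Dict String String) (line : String) : PySem.Dict String String :=
  let low := PySem.Str.lower line
  if PySem.Str.startswith low "schedule name" then d.insert "name" (pvExtract line)
  else if PySem.Str.startswith low "action" then d.insert "action" (pvExtract line)
  else if PySem.Str.startswith low "status" then d.insert "status" (pvExtract line)
  else d

-- B's helper `_fields(block)`
def pvFields (block : List String) : PySem.Dict String String :=
  block.foldl pvApplyB PySem.Dict.empty

-- B's phase-1 grouping step: append a stripped nonblank line to the open block, flush on a blank
def pvStepG (st : List (List String) × List String) (raw_line : String) :
    List (List String) × List String :=
  let line := PySem.Str.strip raw_line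
  if line ≠ "" then (st.1, st.2 ++ [line]) else (st.1 ++ [st.2], [])

def parse_scheduler_output_py_alt (output : String) : List (List (String × String)) :=
  let g := (PySem.Str.splitlines output).foldl pvStepG ([], [])
  let blocks := g.1 ++ [g.2]
  (blocks.foldl (fun acc blk =>
      let d := pvFields blk
      if d.items ≠ [] then acc ++ [d] else acc) []).map PySem.Dict.items

-- ===== PRECONDITION & SPEC =====
def Spec_parse_scheduler_output_py (output : String) (out : List (List (String × String))) : Prop := out = parse_scheduler_output_py_alt output
instance (output : String) (out : List (List (String × String))) : Decidable (Spec_parse_scheduler_output_py output out) := by unfold Spec_parse_scheduler_output_py; infer_instance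

-- ===== CLAIM (what is proved, stated in full; the proofs are below) =====
def Claim_equal_parse_scheduler_output_py : Prop := ∀ (output : String), Dom_parse_scheduler_output_py output → Spec_parse_scheduler_output_py output (parse_scheduler_output_py output)

-- ===== LEMMAS AND PROOFS =====

-- B's phase-2 loop, generalized over the accumulator
def pvEmit (acc : List (PySem.Dict String String)) (bs : List (List String)) :
    List (PySem.Dict String String) :=
  bs.foldl (fun acc blk =>
    let d := pvFields blk
    if d.items ≠ [] then acc ++ [d] else acc) acc

theorem pvEmit_concat (acc : List (PySem.Dict String String)) (bs : List (List String))
    (b : List String) :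
    pvEmit acc (bs ++ [b]) =
      if (pvFields b).items ≠ [] then pvEmit acc bs ++ [pvFields b] else pvEmit acc bs := by
  simp [pvEmit, List.foldl_append]

theorem pvFields_concat (b : List String) (line : String) :
    pvFields (b ++ [line]) = pvApplyB (pvFields b) line := by
  simp [pvFields, List.foldl_append]

theorem pvStepA_blank (sch : List (PySem.Dict String String)) (cur : PySem.Dict String String)
    (raw : String) (h : PySem.Str.strip raw = "") :
    pvStepA (sch, cur) raw =
      if cur.items ≠ [] then (sch ++ [cur], PySem.Dict.empty) else (sch, cur) := by
  simp [pvStepA, h]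

theorem pvStepA_nonblank (sch : List (PySem.Dict String String)) (cur : PySem.Dict String String)
    (raw : String) (h : ¬ PySem.Str.strip raw = "") :
    pvStepA (sch, cur) raw = (sch, pvApplyB cur (PySem.Str.strip raw)) := by
  simp only [pvStepA, pvApplyB, h, ite_false]
  split_ifs <;> rfl

theorem pvStepG_blank (st : List (List String) × List String) (raw : String)
    (h : PySem.Str.strip raw = "") : pvStepG st raw = (st.1 ++ [st.2], []) := by
  simp [pvStepG, h]

theorem pvStepG_nonblank (st : List (List String) × List String) (raw : String)
    (h : ¬ PySem.Str.strip raw = "") :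
    pvStepG st raw = (st.1, st.2 ++ [PySem.Str.strip raw]) := by
  simp [pvStepG, h]

-- The loop invariant: A's running state is (emitted blocks so far, fields of the open block).
theorem pvMain (lines : List String) (bs : List (List String)) (b : List String) :
    (let st := lines.foldl pvStepA (pvEmit [] bs, pvFields b)
     st.1 ++ (if st.2.items ≠ [] then [st.2] else []))
    =
    (let g := lines.foldl pvStepG (bs, b)
     pvEmit [] (g.1 ++ [g.2])) := by
  induction lines generalizing bs b with
  | nil =>
      simp only [List.foldl_nil, pvEmit_concat]
      split_ifs <;> simp_all
  | cons raw rest ih =>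
      simp only [List.foldl_cons]
      by_cases h : PySem.Str.strip raw = ""
      · rw [pvStepA_blank _ _ _ h, pvStepG_blank _ _ h]
        by_cases hne : (pvFields b).items ≠ []
        · have h1 : pvEmit [] bs ++ [pvFields b] = pvEmit [] (bs ++ [b]) := by
            rw [pvEmit_concat]; simp [hne]
          have h2 : (PySem.Dict.empty : PySem.Dict String String) = pvFields [] := rfl
          rw [if_pos hne]
          calc (let st := rest.foldl pvStepA (pvEmit [] bs ++ [pvFields b], PySem.Dict.empty)
                st.1 ++ (if st.2.items ≠ [] then [st.2] else []))
              = (let st := rest.foldl pvStepA (pvEmit [] (bs ++ [b]), pvFields [])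
                st.1 ++ (if st.2.items ≠ [] then [st.2] else [])) := by rw [h1, h2]
            _ = _ := ih (bs ++ [b]) []
        · have h1 : pvEmit [] bs = pvEmit [] (bs ++ [b]) := by
            rw [pvEmit_concat]; simp_all
          have h2 : pvFields b = pvFields [] := PySem.Dict.ext (by simpa using hne)
          rw [if_neg hne]
          calc (let st := rest.foldl pvStepA (pvEmit [] bs, pvFields b)
                st.1 ++ (if st.2.items ≠ [] then [st.2] else []))
              = (let st := rest.foldl pvStepA (pvEmit [] (bs ++ [b]), pvFields [])
                st.1 ++ (if st.2.items ≠ [] then [st.2] else [])) := by rw [h1, h2]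
            _ = _ := ih (bs ++ [b]) []
      · rw [pvStepA_nonblank _ _ _ h, pvStepG_nonblank _ _ h, ← pvFields_concat]
        exact ih bs (b ++ [PySem.Str.strip raw])

-- ===== VERDICT (by name: the statement is the Claim_ definition above) =====
theorem parse_scheduler_output_py_spec : Claim_equal_parse_scheduler_output_py := by
  intro output _
  unfold Spec_parse_scheduler_output_py parse_scheduler_output_py parse_scheduler_output_py_alt
  have h := pvMain (PySem.Str.splitlines output) [] []
  simp only at h
  exact congrArg (List.map PySem.Dict.items) h
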